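-- pv_equiv track=rewrite | github.com/arozovyk/tis-aidga | tis_driver_agent/tis/local.py | _parse_skeleton_output
-- ===== SOURCE A (Python) =====
-- from typing import Any, Dict, List, Optional
--
-- def _parse_skeleton_output(output: str) -> Optional[str]:
--     """
--     Parse TIS skeleton output to extract only the generated code.
--
--     The output format is:
--     [kernel] ... parsing info ...
--     [codegen] <code here with indentation>
--     [time] ... performance info ...
--
--     Returns:
--         Extracted code or None if parsing fails
--     """
--     lines = output.split('\n')
--     code_lines = []
--     in_codegen = False
--
--     for line in lines:
--         # Start capturing after [codegen]
--         if line.startswith('[codegen]'):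
--             in_codegen = True
--             # Extract code from the [codegen] line itself (after the tag)
--             code_part = line[len('[codegen]'):].strip()
--             if code_part:
--                 code_lines.append(code_part)
--             continue
--
--         # Stop at [time] or other tags
--         if line.startswith('[time]') or line.startswith('[kernel]'):
--             if in_codegen:
--                 break
--             continue
--
--         # Capture indented code lines (TIS indents with spaces)
--         if in_codegen:
--             # Remove the leading indentation (TIS uses consistent indentation)
--             if line.startswith('          '):  # 10 spaces TIS prefix
--                 code_lines.append(line[10:])
--             elif line.strip() == '':
--                 code_lines.append('')  # Preserve empty lines
--             else:
--                 code_lines.append(line)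
--
--     if not code_lines:
--         return None
--
--     # Remove trailing empty lines
--     while code_lines and not code_lines[-1].strip():
--         code_lines.pop()
--
--     return '\n'.join(code_lines)
-- ===== SOURCE B (Python) =====
-- def _classify(line):
--     """One token per line: 'H' codegen header, 'T' terminator, 'C' anything else."""
--     if line.startswith('[codegen]'):
--         return 'H'
--     if line.startswith('[time]') or line.startswith('[kernel]'):
--         return 'T'
--     return 'C'
--
--
-- def _parse_skeleton_output(output):
--     """Tokenize the lines first, locate the codegen region by token indices, then
--     build the result in ONE backward pass that transforms lines, drops empty
--     header tails and right-trims blank lines together (no state flag, no pop loop)."""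
--     lines = output.split('\n')
--     toks = [_classify(l) for l in lines]
--     if 'H' not in toks:
--         return None
--     start = toks.index('H')
--     try:
--         end = toks.index('T', start)
--     except ValueError:
--         end = len(lines)
--     acc = None  # None: no code line collected at all (-> return None)
--     for tok, line in zip(reversed(toks[start:end]), reversed(lines[start:end])):
--         if tok == 'H':
--             c = line[len('[codegen]'):].strip()
--             if not c:
--                 continue
--         elif line.startswith('          '):  # 10-space TIS prefix
--             c = line[10:]
--         else:
--             c = line if line.strip() else ''
--         if acc:
--             acc.append(c)
--         elif c.strip():
--             acc = [c]
--         else: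
--             acc = []  # collected, but still trailing-blank: trimmed away
--     if acc is None:
--         return None
--     acc.reverse()
--     return '\n'.join(acc)
-- ===== Notes on version B (the rewrite author's own statement) =====
-- stated objective: alternative
-- what changed: B is a tokenize-then-parse rewrite: it first classifies every line into a token (header/terminator/other), delimits the codegen region purely by token indices (index of first 'H', first 'T' after it), and then builds the result in a single BACKWARD pass over the region that transforms each line, drops empty header tails and trims trailing blank lines all in one accumulator - no in_codegen flag, no break, no trailing while-pop loop.
import Mathlib
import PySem

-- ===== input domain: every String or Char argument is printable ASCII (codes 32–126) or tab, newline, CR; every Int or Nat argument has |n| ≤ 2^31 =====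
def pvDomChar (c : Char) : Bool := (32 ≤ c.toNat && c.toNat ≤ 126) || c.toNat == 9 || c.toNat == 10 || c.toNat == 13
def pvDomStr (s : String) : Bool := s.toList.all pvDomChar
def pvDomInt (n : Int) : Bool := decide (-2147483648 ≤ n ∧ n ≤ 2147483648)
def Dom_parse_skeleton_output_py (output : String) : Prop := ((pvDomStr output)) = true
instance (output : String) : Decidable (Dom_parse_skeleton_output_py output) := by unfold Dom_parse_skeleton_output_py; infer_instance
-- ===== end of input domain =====

-- B is a tokenize-then-parse rewrite of A's state-machine loop: classify every line
-- into a token, delimit the codegen region by token indices, and build the result in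
-- one backward pass that transforms, filters and right-trims together; objective:
-- alternative (same cost, no in_codegen flag, no break, no trailing pop loop).

-- ===== PORT A =====
-- `line.strip() == ''` (also used as the falsy test `not line.strip()`)
def pvBlank (l : String) : Bool := PySem.Str.strip l == ""

-- A's single for-loop with the in_codegen flag; 'break' returns the accumulated list
def pvLoopA : List String → Bool → List String
  | [], _ => []
  | l :: rest, inc =>
    if PySem.Str.startswith l "[codegen]" then
      (let cp := PySem.Str.strip (PySem.Str.slice l (some 9) none)  -- line[len('[codegen]'):].strip()
       if cp == "" then [] else [cp]) ++ pvLoopA rest true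
    else if PySem.Str.startswith l "[time]" || PySem.Str.startswith l "[kernel]" then
      (if inc then [] else pvLoopA rest inc)                        -- break / continue
    else if inc then
      (if PySem.Str.startswith l "          " then PySem.Str.slice l (some 10) none
       else if pvBlank l then "" else l) :: pvLoopA rest true
    else pvLoopA rest inc

-- A's trailing `while code_lines and not code_lines[-1].strip(): code_lines.pop()`
def pvTrimA (xs : List String) : List String :=
  if _h : xs.isEmpty then xs
  else if pvBlank (xs.getLastD "") then pvTrimA xs.dropLast else xs
termination_by xs.length
decreasing_by
  simp only [List.isEmpty_iff] at _h
  have hpos : 0 < xs.length := List.length_pos_of_ne_nil _h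
  simp [List.length_dropLast]
  omega

def parse_skeleton_output_py (output : String) : Option String :=
  let lines := (PySem.Str.split? output "\n").getD []
  let code := pvLoopA lines false
  if code.isEmpty then none
  else some (PySem.Str.join "\n" (pvTrimA code))

-- ===== PORT B =====
-- B's _classify helper: one token per line
def pvClassifyB (line : String) : Char :=
  if PySem.Str.startswith line "[codegen]" then 'H'
  else if PySem.Str.startswith line "[time]" || PySem.Str.startswith line "[kernel]" then 'T'
  else 'C'

-- `if acc: acc.append(c) elif c.strip(): acc = [c] else: acc = []`
def pvPushB (acc : Option (List String)) (c : String) : Option (List String) :=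
  match acc with
  | some (x :: xs) => some ((x :: xs) ++ [c])
  | _ => if PySem.Str.strip c != "" then some [c] else some []

-- body of B's backward consolidating loop, one (tok, line) pair at a time
def pvStepB (acc : Option (List String)) (p : Char × String) : Option (List String) :=
  if p.1 == 'H' then
    let c := PySem.Str.strip (PySem.Str.slice p.2 (some 9) none)  -- line[len('[codegen]'):].strip()
    if c == "" then acc                                           -- continue
    else pvPushB acc c
  else
    let c := if PySem.Str.startswith p.2 "          " then PySem.Str.slice p.2 (some 10) none
             else if PySem.Str.strip p.2 != "" then p.2 else ""
    pvPushB acc c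

def parse_skeleton_output_py_alt (output : String) : Option String :=
  let lines := (PySem.Str.split? output "\n").getD []
  let toks := lines.map pvClassifyB
  if toks.contains 'H' then
    let start := (PySem.List.index? toks 'H').getD 0              -- 'H' is present: getD is exact
    let endi : Nat := match PySem.List.index? (toks.drop start) 'T' with  -- toks.index('T', start) / except ValueError
                      | some j => start + j
                      | none => lines.length
    -- zip(reversed(toks[start:end]), reversed(lines[start:end]))
    let pairs := (PySem.List.slice toks (some (start : Int)) (some (endi : Int))).reverse.zip
                 ((PySem.List.slice lines (some (start : Int)) (some (endi : Int))).reverse)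
    match pairs.foldl pvStepB none with
    | none => none
    | some acc => some (PySem.Str.join "\n" acc.reverse)          -- acc.reverse(); '\n'.join(acc)
  else none

-- ===== PRECONDITION & SPEC =====
def Spec_parse_skeleton_output_py (output : String) (out : Option String) : Prop := out = parse_skeleton_output_py_alt output
instance (output : String) (out : Option String) : Decidable (Spec_parse_skeleton_output_py output out) := by unfold Spec_parse_skeleton_output_py; infer_instance

-- ===== CLAIM (what is proved, stated in full; the proofs are below) =====
def Claim_equal_parse_skeleton_output_py : Prop := ∀ (output : String), Dom_parse_skeleton_output_py output → Spec_parse_skeleton_output_py output (parse_skeleton_output_py output)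

-- ===== LEMMAS AND PROOFS =====

-- A's per-line classification inside the region, as one function (proof-side only)
def pvExtract (l : String) : Option String :=
  if PySem.Str.startswith l "[codegen]" then
    let t := PySem.Str.strip (PySem.Str.slice l (some 9) none)
    if t == "" then none else some t
  else if PySem.Str.startswith l "          " then some (PySem.Str.slice l (some 10) none)
  else if pvBlank l then some ""
  else some l

-- index of the first '[codegen]' line (proof-side counterpart of toks.index('H'))
def pvFindCodegen : List String → Option Nat
  | [] => none
  | l :: rest =>
    if PySem.Str.startswith l "[codegen]" then some 0
    else (pvFindCodegen rest).map (· + 1)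

-- the lines A captures before 'break': up to the first '[time]'/'[kernel]' line
def pvRegion : List String → List String
  | [] => []
  | l :: rest =>
    if PySem.Str.startswith l "[time]" || PySem.Str.startswith l "[kernel]" then []
    else l :: pvRegion rest

-- remove trailing blank lines, structurally from the front
def pvRtrim : List String → List String
  | [] => []
  | c :: cs =>
    match pvRtrim cs with
    | [] => if pvBlank c then [] else [c]
    | x :: xs => c :: (x :: xs)

-- a line starting with '[codegen]' starts with neither '[time]' nor '[kernel]'
lemma pv_codegen_clash (cs : List Char)
    (h : PySem.Chars.startswith cs ['[','c','o','d','e','g','e','n',']'] = true) :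
    PySem.Chars.startswith cs ['[','t','i','m','e',']'] = false ∧
    PySem.Chars.startswith cs ['[','k','e','r','n','e','l',']'] = false := by
  rw [PySem.Chars.startswith_iff] at h
  obtain ⟨t, ht⟩ := h
  constructor <;>
    · rw [Bool.eq_false_iff]
      intro hp
      rw [PySem.Chars.startswith_iff] at hp
      obtain ⟨u, hu⟩ := hp
      have hx := hu.trans ht.symm
      simp at hx

lemma pvLoopA_true (ls : List String) :
    pvLoopA ls true = (pvRegion ls).filterMap pvExtract := by
  induction ls with
  | nil => rfl
  | cons l rest ih =>
    by_cases hc : PySem.Chars.startswith l.toList ['[','c','o','d','e','g','e','n',']'] = true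
    · obtain ⟨h1, h2⟩ := pv_codegen_clash l.toList hc
      by_cases hcp : PySem.Str.strip (PySem.Str.slice l (some 9) none) = "" <;>
        simp [pvLoopA, pvRegion, pvExtract, hc, h1, h2, hcp, ih]
    · by_cases ht : PySem.Chars.startswith l.toList ['[','t','i','m','e',']'] = true
      · simp [pvLoopA, pvRegion, hc, ht]
      · by_cases hk : PySem.Chars.startswith l.toList ['[','k','e','r','n','e','l',']'] = true
        · simp [pvLoopA, pvRegion, hc, ht, hk]
        · simp [pvLoopA, pvRegion, pvExtract, List.filterMap_cons, hc, ht, hk, ih]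
          split <;> first | rfl | (split <;> rfl)

lemma pvLoopA_false (ls : List String) :
    pvLoopA ls false =
      match pvFindCodegen ls with
      | none => []
      | some i => pvLoopA (ls.drop i) false := by
  induction ls with
  | nil => rfl
  | cons l rest ih =>
    by_cases hc : PySem.Chars.startswith l.toList ['[','c','o','d','e','g','e','n',']'] = true
    · simp only [pvFindCodegen]
      simp [hc]
    · have hstep : pvLoopA (l :: rest) false = pvLoopA rest false := by
        simp only [pvLoopA]
        rw [if_neg (by simpa using hc)]
        split <;> rfl
      rw [hstep, ih]
      simp only [pvFindCodegen]
      rw [if_neg (by simpa using hc)]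
      cases pvFindCodegen rest <;> simp

lemma pvFindCodegen_some (ls : List String) (i : Nat) (h : pvFindCodegen ls = some i) :
    ∃ l rest, ls.drop i = l :: rest ∧
      PySem.Chars.startswith l.toList ['[','c','o','d','e','g','e','n',']'] = true := by
  induction ls generalizing i with
  | nil => simp [pvFindCodegen] at h
  | cons l rest ih =>
    by_cases hc : PySem.Chars.startswith l.toList ['[','c','o','d','e','g','e','n',']'] = true
    · simp only [pvFindCodegen] at h
      simp [hc] at h
      exact ⟨l, rest, by simp [← h], hc⟩
    · simp only [pvFindCodegen] at h
      rw [if_neg (by simpa using hc)] at h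
      simp only [Option.map_eq_some_iff] at h
      obtain ⟨j, hj, rfl⟩ := h
      obtain ⟨l', r', hd, hs⟩ := ih j hj
      exact ⟨l', r', by simpa using hd, hs⟩

-- B's token search = pvFindCodegen
lemma pv_index_H (ls : List String) :
    PySem.List.index? (ls.map pvClassifyB) 'H' = pvFindCodegen ls := by
  induction ls with
  | nil => rfl
  | cons l rest ih =>
    by_cases hc : PySem.Chars.startswith l.toList ['[','c','o','d','e','g','e','n',']'] = true
    · have htag : pvClassifyB l = 'H' := by simp [pvClassifyB, hc]
      rw [List.map_cons, htag, PySem.List.index?_cons_self]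
      simp only [pvFindCodegen]
      rw [if_pos (by simpa using hc)]
    · have hne : pvClassifyB l ≠ 'H' := by
        simp only [pvClassifyB]
        rw [if_neg (by simpa using hc)]
        split <;> decide
      rw [List.map_cons, PySem.List.index?_cons_of_ne _ hne, ih]
      simp only [pvFindCodegen]
      rw [if_neg (by simpa using hc)]

-- pvRegion = take up to the first 'T' token
lemma pv_region_take (ls : List String) :
    pvRegion ls = ls.take ((PySem.List.index? (ls.map pvClassifyB) 'T').getD ls.length) := by
  induction ls with
  | nil => rfl
  | cons l rest ih =>
    by_cases htk : (PySem.Chars.startswith l.toList ['[','t','i','m','e',']'] ||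
        PySem.Chars.startswith l.toList ['[','k','e','r','n','e','l',']']) = true
    · have hc : PySem.Chars.startswith l.toList ['[','c','o','d','e','g','e','n',']'] = false := by
        rcases Bool.or_eq_true _ _ |>.mp htk with h | h
        · by_contra hx
          have := (pv_codegen_clash l.toList (by simpa using hx)).1
          simp [h] at this
        · by_contra hx
          have := (pv_codegen_clash l.toList (by simpa using hx)).2
          simp [h] at this
      have htag : pvClassifyB l = 'T' := by
        simp only [pvClassifyB]
        rw [if_neg (by simp [hc]), if_pos (by simpa using htk)]
      rw [List.map_cons, htag, PySem.List.index?_cons_self]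
      simp [pvRegion, htk]
    · have hne : pvClassifyB l ≠ 'T' := by
        simp only [pvClassifyB]
        split
        · decide
        · rw [if_neg (by simpa using htk)]; decide
      rw [List.map_cons, PySem.List.index?_cons_of_ne _ hne]
      have hr : pvRegion (l :: rest) = l :: pvRegion rest := by
        simp [pvRegion, htk]
      rw [hr, ih]
      cases PySem.List.index? (rest.map pvClassifyB) 'T' <;> simp

-- the backward consolidating fold, as structural recursion from the front
def pvFoldB : List String → Option (List String)
  | [] => none
  | l :: rest => pvStepB (pvFoldB rest) (pvClassifyB l, l)

lemma pvFoldB_eq_foldl (r : List String) :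
    (r.map (fun l => (pvClassifyB l, l))).reverse.foldl pvStepB none = pvFoldB r := by
  induction r with
  | nil => rfl
  | cons l rest ih =>
    simp only [List.map_cons, List.reverse_cons, List.foldl_append, ih, List.foldl_cons,
      List.foldl_nil, pvFoldB]

-- pushing onto a nonempty accumulator appends
lemma pvPushB_some_cons (x : String) (xs : List String) (c : String) :
    pvPushB (some (x :: xs)) c = some ((x :: xs) ++ [c]) := rfl

-- one consolidation step = pvRtrim of the extended code list (reversed)
lemma pvPushB_rtrim (c : String) (code : List String) :
    pvPushB (match code with
             | [] => none
             | _ => some (pvRtrim code).reverse) c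
      = some (pvRtrim (c :: code)).reverse := by
  cases code with
  | nil =>
    show pvPushB none c = _
    simp only [pvPushB, pvRtrim, bne_iff_ne, ne_eq, ite_not]
    by_cases hb : PySem.Str.strip c = "" <;> simp [pvBlank, hb]
  | cons y ys =>
    have hrw : pvRtrim (c :: y :: ys) =
        match pvRtrim (y :: ys) with
        | [] => if pvBlank c then [] else [c]
        | x :: xs => c :: (x :: xs) := rfl
    cases hrt : pvRtrim (y :: ys) with
    | nil =>
      rw [hrw, hrt]
      show pvPushB (some ([] : List String).reverse) c = _
      simp only [List.reverse_nil, pvPushB, bne_iff_ne, ne_eq, ite_not]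
      by_cases hb : PySem.Str.strip c = "" <;> simp [pvBlank, hb]
    | cons x xs =>
      rw [hrw, hrt]
      show pvPushB (some (x :: xs).reverse) c = some ((c :: (x :: xs)).reverse)
      obtain ⟨z, zs, hz⟩ : ∃ z zs, (x :: xs).reverse = z :: zs := by
        cases h : (x :: xs).reverse with
        | nil => exact absurd (congrArg List.length h) (by simp)
        | cons z zs => exact ⟨z, zs, rfl⟩
      rw [hz, pvPushB_some_cons, List.reverse_cons, hz]

-- what the fold computes: none iff nothing collected, else the right-trimmed code reversed
lemma pvFoldB_spec (r : List String) :
    pvFoldB r =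
      match r.filterMap pvExtract with
      | [] => none
      | _ => some (pvRtrim (r.filterMap pvExtract)).reverse := by
  induction r with
  | nil => rfl
  | cons l rest ih =>
    rw [show pvFoldB (l :: rest) = pvStepB (pvFoldB rest) (pvClassifyB l, l) from rfl, ih]
    by_cases hc : PySem.Str.startswith l "[codegen]" = true
    · have htag : pvClassifyB l = 'H' := by simp only [pvClassifyB]; rw [if_pos hc]
      by_cases hcp : PySem.Str.strip (PySem.Str.slice l (some 9) none) = ""
      · have hext : pvExtract l = none := by
          simp only [pvExtract]
          rw [if_pos hc, if_pos (by simp [hcp])]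
        simp only [pvStepB, htag, List.filterMap_cons, hext]
        rw [if_pos (by decide), if_pos (by simp [hcp])]
      · have hext : pvExtract l = some (PySem.Str.strip (PySem.Str.slice l (some 9) none)) := by
          simp only [pvExtract]
          rw [if_pos hc, if_neg (by simp [hcp])]
        simp only [pvStepB, htag, List.filterMap_cons, hext]
        rw [if_pos (by decide), if_neg (by simp [hcp])]
        exact pvPushB_rtrim _ _
    · have htag : pvClassifyB l ≠ 'H' := by
        simp only [pvClassifyB]
        rw [if_neg hc]
        split <;> decide
      have hext : pvExtract l = some (if PySem.Str.startswith l "          "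
          then PySem.Str.slice l (some 10) none
          else if PySem.Str.strip l != "" then l else "") := by
        simp only [pvExtract, pvBlank]
        rw [if_neg hc]
        by_cases h10 : PySem.Str.startswith l "          " = true
        · rw [if_pos h10, if_pos h10]
        · rw [if_neg h10, if_neg h10]
          by_cases hb : PySem.Str.strip l = ""
          · rw [if_pos (by simp [hb]), if_neg (by simp [hb])]
          · rw [if_neg (by simp [hb]), if_pos (by simp [hb])]
      simp only [pvStepB, List.filterMap_cons, hext]
      rw [if_neg (by simp [htag])]
      exact pvPushB_rtrim _ _

-- pvRtrim over a snoc
lemma pvRtrim_append (xs : List String) (a : String) :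
    pvRtrim (xs ++ [a]) = if pvBlank a then pvRtrim xs else xs ++ [a] := by
  induction xs with
  | nil => by_cases hb : pvBlank a = true <;> simp [pvRtrim, hb]
  | cons x xs ih =>
    simp only [List.cons_append, pvRtrim, ih]
    by_cases hb : pvBlank a = true
    · simp [hb]
    · simp only [hb, Bool.false_eq_true, if_false]
      cases xs <;> simp

-- A's pop loop = pvRtrim
lemma pvTrimA_eq_rtrim (xs : List String) : pvTrimA xs = pvRtrim xs := by
  induction xs using List.reverseRecOn with
  | nil => rw [pvTrimA]; rfl
  | append_singleton xs a ih =>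
    rw [pvTrimA, pvRtrim_append]
    have hne : (xs ++ [a]).isEmpty = false := by simp
    have hlast : (xs ++ [a]).getLastD "" = a := by simp
    simp only [hne, Bool.false_eq_true, dite_eq_ite, if_false, hlast]
    by_cases hb : pvBlank a = true <;> simp [hb, ih]

-- ===== VERDICT (by name: the statement is the Claim_ definition above) =====
theorem parse_skeleton_output_py_spec : Claim_equal_parse_skeleton_output_py := by
  intro output _
  unfold Spec_parse_skeleton_output_py parse_skeleton_output_py parse_skeleton_output_py_alt
  simp only
  set lines := (PySem.Str.split? output "\n").getD [] with hlines
  rw [pvLoopA_false]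
  cases hf : pvFindCodegen lines with
  | none =>
    have hmem : 'H' ∉ lines.map pvClassifyB := by
      rw [← PySem.List.index?_eq_none_iff, pv_index_H, hf]
    simp [hmem]
  | some i =>
    obtain ⟨l, rest, hd, hc⟩ := pvFindCodegen_some _ i hf
    have hidx : PySem.List.index? (lines.map pvClassifyB) 'H' = some i := by
      rw [pv_index_H, hf]
    have hmem : 'H' ∈ lines.map pvClassifyB := by
      rw [← PySem.List.index?_isSome_iff, hidx]; rfl
    have hloop : pvLoopA (lines.drop i) false =
        (pvRegion (lines.drop i)).filterMap pvExtract := by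
      rw [hd]
      obtain ⟨h1, h2⟩ := pv_codegen_clash l.toList hc
      by_cases hcp : PySem.Str.strip (PySem.Str.slice l (some 9) none) = "" <;>
        simp [pvLoopA, pvRegion, pvExtract, hc, h1, h2, hcp, pvLoopA_true]
    have hilen : i < lines.length := by
      have := congrArg List.length hd
      simp at this
      omega
    -- B's two slices equal the region and its token image
    have hmaps : (lines.map pvClassifyB).drop i = (lines.drop i).map pvClassifyB := by
      simp [List.map_drop]
    have hend : ∀ endi : Nat,
        endi = (match PySem.List.index? ((lines.map pvClassifyB).drop i) 'T' with
                | some j => i + j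
                | none => lines.length) →
        PySem.List.slice lines (some (i : Int)) (some (endi : Int)) = pvRegion (lines.drop i) ∧
        PySem.List.slice (lines.map pvClassifyB) (some (i : Int)) (some (endi : Int)) =
          (pvRegion (lines.drop i)).map pvClassifyB := by
      intro endi hdef
      have hreg := pv_region_take (lines.drop i)
      rw [hmaps] at hdef
      cases hTi : PySem.List.index? ((lines.drop i).map pvClassifyB) 'T' with
      | some j =>
        rw [hTi] at hdef
        simp only [hdef]
        have h1 : PySem.List.slice lines (some (i : Int)) (some ((i + j : Nat) : Int)) =
            (lines.drop i).take j := by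
          rw [PySem.List.slice_natCast]
          congr 1
          omega
        have h2 : PySem.List.slice (lines.map pvClassifyB) (some (i : Int)) (some ((i + j : Nat) : Int)) =
            ((lines.map pvClassifyB).drop i).take j := by
          rw [PySem.List.slice_natCast]
          congr 1
          omega
        refine ⟨?_, ?_⟩
        · rw [h1, hreg, hTi]
          simp
        · rw [h2, hmaps, ← List.map_take, hreg, hTi]
          simp
      | none =>
        rw [hTi] at hdef
        simp only [hdef]
        have hlen : (lines.drop i).length = lines.length - i := by simp
        have h1 : PySem.List.slice lines (some (i : Int)) (some ((lines.length : Nat) : Int)) =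
            (lines.drop i).take (lines.length - i) := by
          rw [PySem.List.slice_natCast]
        have h2 : PySem.List.slice (lines.map pvClassifyB) (some (i : Int)) (some ((lines.length : Nat) : Int)) =
            ((lines.map pvClassifyB).drop i).take (lines.length - i) := by
          rw [PySem.List.slice_natCast]
        refine ⟨?_, ?_⟩
        · rw [h1, hreg, hTi, hlen]
          simp
        · rw [h2, hmaps, ← List.map_take, hreg, hTi, hlen]
          simp
    obtain ⟨hs1, hs2⟩ := hend _ rfl
    simp only [List.contains_iff_mem, hmem, if_true, hidx, Option.getD_some, hs1, hs2]
    -- fold over the zipped reversed slices = pvFoldB of the region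
    have hzip : ((pvRegion (lines.drop i)).map pvClassifyB).reverse.zip
        (pvRegion (lines.drop i)).reverse =
        ((pvRegion (lines.drop i)).map (fun l => (pvClassifyB l, l))).reverse := by
      rw [← List.map_reverse, ← List.map_reverse]
      rw [show ((pvRegion (lines.drop i)).reverse.map pvClassifyB).zip
          (pvRegion (lines.drop i)).reverse =
          ((pvRegion (lines.drop i)).reverse.map pvClassifyB).zip
          ((pvRegion (lines.drop i)).reverse.map id) by simp]
      rw [List.zip_map']
      rfl
    rw [hzip, pvFoldB_eq_foldl, pvFoldB_spec, hloop]
    cases hcode : (pvRegion (lines.drop i)).filterMap pvExtract with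
    | nil => simp
    | cons y ys =>
      simp only [List.isEmpty_cons, Bool.false_eq_true, if_false]
      rw [pvTrimA_eq_rtrim, List.reverse_reverse]
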